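-- pv_equiv track=rewrite | github.com/tiendu/utility | merge_count_table.py | merge_sequences
-- ===== SOURCE A (Python) =====
-- from typing import List, Tuple, Union
--
-- def merge_sequences(data: List[List[Union[str, int]]]) -> Tuple[List[str], dict]:
--     result = {}
--     header = data[0]
--
--     for row in data[1:]:
--         row_id = row[0]
--         values = [int(value) if value.strip() else 0 for value in row[1:]]
--         if row_id not in result:
--             result[row_id] = values
--         else:
--             for i in range(len(values)):
--                 result[row_id][i] += values[i]
--     merged_result = {}
--
--     for current_id, current_value in result.items():
--         found = False
--         for other_id, other_value in result.items():
--             if current_id != other_id and (current_id in other_id or other_id in current_id):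
--                 merged_id = current_id if len(current_id) >= len(other_id) else other_id
--                 if merged_id not in merged_result:
--                     merged_result[merged_id] = [0] * (len(header) - 1)
--                 for i in range(len(current_value)):
--                     merged_result[merged_id][i] += current_value[i]
--                 found = True
--                 break
--         if not found:
--             merged_result[current_id] = current_value
--
--     return header, merged_result
-- ===== SOURCE B (Python) =====
-- def merge_sequences(data):
--     header = data[0]
--     width = len(header) - 1
--
--     sums = {}
--     for row in data[1:]:
--         rid = row[0]
--         vals = [int(v) if v.strip() else 0 for v in row[1:]]
--         prev = sums.get(rid)
--         sums[rid] = vals if prev is None else [a + b for a, b in zip(prev, vals)]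
--
--     ids = list(sums)
--     pos = {x: i for i, x in enumerate(ids)}
--
--     # Find each id's first (lowest-index) substring partner WITHOUT scanning all
--     # id pairs: enumerate the substrings of every id against the id hash map.
--     # Every related pair (one id a contiguous substring of the other) is seen
--     # from its longer side, and both sides' minima are updated there.
--     best = {}
--     for i, x in enumerate(ids):
--         for a in range(len(x) + 1):
--             for b in range(a, len(x) + 1):
--                 sub = x[a:b]
--                 if sub != x and sub in pos:
--                     j = pos[sub]
--                     if x not in best or j < best[x]:
--                         best[x] = j
--                     if sub not in best or i < best[sub]:
--                         best[sub] = i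
--
--     merged = {}
--     for x, v in sums.items():
--         if x not in best:
--             merged[x] = v
--         else:
--             y = ids[best[x]]
--             t = x if len(x) >= len(y) else y
--             acc = merged.get(t, [0] * width)
--             merged[t] = [p + q for p, q in zip(acc, v)]
--     return header, merged
-- ===== Notes on version B (the rewrite author's own statement) =====
-- stated objective: alternative
-- what changed: A's quadratic pairwise id-by-id substring scan is replaced by enumerating each id's O(L^2) substrings against a hash map of all ids, recording for both sides of every discovered pair the minimum partner index (first-match order), so no id-times-id loop remains; the merge then dispatches on that precomputed index map.
-- outside the precondition, e.g. on merge_sequences([[''], ['', ''], ['']]): A returns ([''], {'': [0]}), B returns ([''], {'': []})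
import Mathlib
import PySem

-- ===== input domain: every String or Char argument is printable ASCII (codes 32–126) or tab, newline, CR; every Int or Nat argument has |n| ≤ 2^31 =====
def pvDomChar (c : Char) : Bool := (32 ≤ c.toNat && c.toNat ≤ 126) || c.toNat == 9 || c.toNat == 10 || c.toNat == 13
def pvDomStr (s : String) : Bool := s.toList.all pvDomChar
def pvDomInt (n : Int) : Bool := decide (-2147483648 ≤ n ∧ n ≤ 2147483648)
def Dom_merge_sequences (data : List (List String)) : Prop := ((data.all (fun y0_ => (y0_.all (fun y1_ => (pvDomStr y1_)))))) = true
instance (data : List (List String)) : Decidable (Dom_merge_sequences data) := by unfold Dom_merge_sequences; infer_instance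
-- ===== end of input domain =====

-- B finds each id's first substring partner by enumerating the substrings of every id
-- against a hash map of all ids and keeping per-id minimum partner indices, instead of
-- A's pairwise id-by-id first-match scan; the merge loop then dispatches on that
-- precomputed index map; objective: alternative.

-- shared cell parser: the expression 'int(value) if value.strip() else 0' occurring in both sources
def pvParse (v : String) : Int :=
  if PySem.Str.strip v == "" then 0 else (PySem.Int.ofStr? v).getD 0

-- ===== PORT A =====
def merge_sequences (data : List (List String)) : List String × (List (String × List Int)) :=
  let header := (PySem.List.pyGet? data 0).getD []
  let result : PySem.Dict String (List Int) :=
    (PySem.List.slice data (some 1) none).foldl (fun result row =>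
      let row_id := (PySem.List.pyGet? row 0).getD ""
      let values := (PySem.List.slice row (some 1) none).map pvParse
      if !result.contains row_id then
        result.insert row_id values
      else
        result.modify row_id [] (fun cur =>
          (List.range values.length).foldl (fun l i => l.set i (l.getD i 0 + values.getD i 0)) cur))
      PySem.Dict.empty
  let merged : PySem.Dict String (List Int) :=
    result.items.foldl (fun merged p =>
      match result.items.find? (fun q => !(p.1 == q.1) && (PySem.Str.isIn p.1 q.1 || PySem.Str.isIn q.1 p.1)) with
      | some q =>
        let merged_id := if PySem.Str.len q.1 ≤ PySem.Str.len p.1 then p.1 else q.1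
        let merged :=
          if !merged.contains merged_id then
            merged.insert merged_id (List.replicate (header.length - 1) 0)
          else merged
        merged.modify merged_id [] (fun l =>
          (List.range p.2.length).foldl (fun l i => l.set i (l.getD i 0 + p.2.getD i 0)) l)
      | none => merged.insert p.1 p.2)
      PySem.Dict.empty
  (header, merged.items)

-- ===== PORT B =====
-- B's helper '_offer': keep the smaller candidate index for key k
def pvOffer (best : PySem.Dict String Nat) (k : String) (j : Nat) : PySem.Dict String Nat :=
  if !best.contains k || decide (j < best.getD k 0) then best.insert k j else best

def merge_sequences_alt (data : List (List String)) : List String × (List (String × List Int)) :=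
  let header := (PySem.List.pyGet? data 0).getD []
  let width := header.length - 1
  let sums : PySem.Dict String (List Int) :=
    (PySem.List.slice data (some 1) none).foldl (fun d row =>
      let rid := (PySem.List.pyGet? row 0).getD ""
      let vals := (PySem.List.slice row (some 1) none).map pvParse
      match d.get? rid with
      | none => d.insert rid vals
      | some prev => d.insert rid ((prev.zip vals).map (fun p => p.1 + p.2)))
      PySem.Dict.empty
  let ids := sums.keys
  let pos : PySem.Dict String Nat :=
    ids.zipIdx.foldl (fun d p => d.insert p.1 p.2) PySem.Dict.empty
  let best : PySem.Dict String Nat :=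
    ids.zipIdx.foldl (fun best xi =>
      (PySem.List.pyRange 0 (PySem.Str.len xi.1 + 1) 1).foldl (fun best a =>
        (PySem.List.pyRange a (PySem.Str.len xi.1 + 1) 1).foldl (fun best b =>
          let sub := PySem.Str.slice xi.1 (some a) (some b)
          if !(sub == xi.1) && pos.contains sub then
            pvOffer (pvOffer best xi.1 (pos.getD sub 0)) sub xi.2
          else best) best) best)
      PySem.Dict.empty
  let merged : PySem.Dict String (List Int) :=
    sums.items.foldl (fun m p =>
      match best.get? p.1 with
      | none => m.insert p.1 p.2
      | some j =>
        let y := (PySem.List.pyGet? ids (j : Int)).getD ""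
        let t := if PySem.Str.len y ≤ PySem.Str.len p.1 then p.1 else y
        let acc := m.getD t (List.replicate width 0)
        m.insert t ((acc.zip p.2).map (fun q => q.1 + q.2)))
      PySem.Dict.empty
  (header, merged.items)

-- ===== PRECONDITION & SPEC =====
-- Pre_ restricts to well-formed rectangular tables (each data row exactly as long as the header,
-- hence nonempty, and every value cell blank or an int literal): on other inputs A raises
-- IndexError/ValueError, or — on ragged rows it accepts — mixes zero-padded and unpadded rows,
-- an accident of its two initialization paths.
def Pre_merge_sequences (data : List (List String)) : Prop :=
  data ≠ [] ∧
    ∀ row ∈ data.drop 1, row.length = (data.headD []).length ∧ 1 ≤ row.length ∧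
      ∀ v ∈ row.drop 1, PySem.Str.strip v = "" ∨ (PySem.Int.ofStr? v).isSome = true
instance (data : List (List String)) : Decidable (Pre_merge_sequences data) := by
  unfold Pre_merge_sequences; infer_instance

def pvWitness_merge_sequences : List (List String) :=
  [["id", "c1", "c2"], ["ab", "1", " 2 "], ["b", "", "+3"], ["ab", "4", "5"], ["x", "6", "7"]]

def Spec_merge_sequences (data : List (List String)) (out : List String × (List (String × List Int))) : Prop := out = merge_sequences_alt data
instance (data : List (List String)) (out : List String × (List (String × List Int))) : Decidable (Spec_merge_sequences data out) := by unfold Spec_merge_sequences; infer_instance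

-- ===== CLAIM (what is proved, stated in full; the proofs are below) =====
def Claim_equal_merge_sequences : Prop := ∀ (data : List (List String)), Dom_merge_sequences data → Pre_merge_sequences data → Spec_merge_sequences data (merge_sequences data)

-- ===== LEMMAS AND PROOFS =====

-- elementwise zip-add (B's '[a + b for a, b in zip(x, y)]')
def pvZAdd (a b : List Int) : List Int := (a.zip b).map (fun p => p.1 + p.2)

theorem pvZAdd_length (a b : List Int) : (pvZAdd a b).length = min a.length b.length := by
  simp [pvZAdd, List.length_zip]

theorem pv_aux_shift (vs : List Int) :
    ∀ (idxs : List Nat) (a : Int) (cs : List Int),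
      idxs.foldl (fun l i => l.set (i+1) (l.getD (i+1) 0 + vs.getD i 0)) (a :: cs)
        = a :: idxs.foldl (fun l i => l.set i (l.getD i 0 + vs.getD i 0)) cs := by
  intro idxs
  induction idxs with
  | nil => intro a cs; rfl
  | cons i idxs ih =>
    intro a cs
    simp only [List.foldl_cons, List.getD_cons_succ, List.set_cons_succ, ih]

-- A's in-place index loop equals B's zip-add on equal-length lists
theorem pvFold_set_eq_zadd :
    ∀ (vals cur : List Int), cur.length = vals.length →
      (List.range vals.length).foldl (fun l i => l.set i (l.getD i 0 + vals.getD i 0)) cur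
        = pvZAdd cur vals := by
  intro vals
  induction vals with
  | nil =>
    intro cur h
    rw [List.length_eq_zero_iff.mp h]; rfl
  | cons v vs ih =>
    intro cur h
    match cur, h with
    | c :: cs, h =>
      have hlen : cs.length = vs.length := by simpa using h
      rw [List.length_cons, List.range_succ_eq_map]
      simp only [List.foldl_cons, List.foldl_map, List.getD_cons_succ,
        List.getD_cons_zero, List.set_cons_zero]
      rw [pv_aux_shift vs, ih cs hlen]
      simp [pvZAdd]

-- the summing-loop bodies of the two ports, as named step functions (definitionally the ports' lambdas)
def pvStepA (result : PySem.Dict String (List Int)) (row : List String) : PySem.Dict String (List Int) :=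
  let row_id := (PySem.List.pyGet? row 0).getD ""
  let values := (PySem.List.slice row (some 1) none).map pvParse
  if !result.contains row_id then
    result.insert row_id values
  else
    result.modify row_id [] (fun cur =>
      (List.range values.length).foldl (fun l i => l.set i (l.getD i 0 + values.getD i 0)) cur)

def pvStepB (d : PySem.Dict String (List Int)) (row : List String) : PySem.Dict String (List Int) :=
  let rid := (PySem.List.pyGet? row 0).getD ""
  let vals := (PySem.List.slice row (some 1) none).map pvParse
  match d.get? rid with
  | none => d.insert rid vals
  | some prev => d.insert rid ((prev.zip vals).map (fun p => p.1 + p.2))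

theorem pv_loop1 (H : Nat) :
    ∀ (rows : List (List String)) (d : PySem.Dict String (List Int)),
      (∀ row ∈ rows, row.length = H) →
      (∀ p ∈ d.items, p.2.length = H - 1) →
      d.keys.Nodup →
      rows.foldl pvStepA d = rows.foldl pvStepB d
      ∧ (∀ p ∈ (rows.foldl pvStepB d).items, p.2.length = H - 1)
      ∧ (rows.foldl pvStepB d).keys.Nodup := by
  intro rows
  induction rows with
  | nil => exact fun d _ hinv hnd => ⟨rfl, hinv, hnd⟩
  | cons row rows ih =>
    intro d hlen hinv hnd
    have hrow : row.length = H := hlen row (by simp)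
    have hvals : ((PySem.List.slice row (some 1) none).map pvParse).length = H - 1 := by
      simp [pysem, hrow]
    set rid := (PySem.List.pyGet? row 0).getD "" with hrid
    set vals := (PySem.List.slice row (some 1) none).map pvParse with hvalsdef
    have hstep : pvStepA d row = pvStepB d row := by
      cases hg : d.get? rid with
      | none =>
        have hc : d.contains rid = false := by
          rw [PySem.Dict.contains_eq_isSome_get?, hg]; rfl
        simp only [pvStepA, pvStepB, ← hrid, ← hvalsdef, hg, hc]
        rfl
      | some prev =>
        have hc : d.contains rid = true := by
          rw [PySem.Dict.contains_eq_isSome_get?, hg]; rfl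
        have hmem : (rid, prev) ∈ d.items := PySem.Dict.mem_items_of_get?_eq_some _ hg
        have hprev : prev.length = H - 1 := hinv _ hmem
        simp only [pvStepA, pvStepB, ← hrid, ← hvalsdef, hg, hc, Bool.not_true, Bool.false_eq_true, if_false]
        rw [show (d.modify rid [] (fun cur =>
              (List.range vals.length).foldl (fun l i => l.set i (l.getD i 0 + vals.getD i 0)) cur))
            = d.insert rid ((List.range vals.length).foldl
                (fun l i => l.set i (l.getD i 0 + vals.getD i 0)) (d.getD rid []))
          from by simp [PySem.Dict.modify]]
        rw [PySem.Dict.getD_of_get?_eq_some d [] hg,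
          pvFold_set_eq_zadd vals prev (by rw [hprev, hvals])]
        rfl
    have hinv' : ∀ p ∈ (pvStepB d row).items, p.2.length = H - 1 := by
      intro p hp
      cases hg : d.get? rid with
      | none =>
        rw [pvStepB] at hp
        simp only [← hrid, ← hvalsdef, hg] at hp
        rcases (PySem.Dict.mem_items_insert _ _ _ _).mp hp with h1 | h2
        · rw [h1]; exact hvals
        · exact hinv _ h2.1
      | some prev =>
        have hmem : (rid, prev) ∈ d.items := PySem.Dict.mem_items_of_get?_eq_some _ hg
        have hprev : prev.length = H - 1 := hinv _ hmem
        rw [pvStepB] at hp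
        simp only [← hrid, ← hvalsdef, hg] at hp
        rcases (PySem.Dict.mem_items_insert _ _ _ _).mp hp with h1 | h2
        · rw [h1]
          show (pvZAdd prev vals).length = H - 1
          rw [pvZAdd_length, hprev, hvals]; simp
        · exact hinv _ h2.1
    have hnd' : (pvStepB d row).keys.Nodup := by
      rw [pvStepB]
      cases hg : d.get? rid with
      | none => simp only [← hrid, ← hvalsdef]; exact PySem.Dict.nodup_keys_insert _ _ _ hnd
      | some prev => simp only [← hrid, ← hvalsdef]; exact PySem.Dict.nodup_keys_insert _ _ _ hnd
    have hres := ih (pvStepB d row) (fun r hr => hlen r (by simp [hr])) hinv' hnd'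
    refine ⟨?_, hres.2.1, hres.2.2⟩
    rw [List.foldl_cons, List.foldl_cons, hstep]
    exact hres.1

-- the substring-partner relation of both Pythons, as a named predicate
def pvRel (x y : String) : Bool := !(x == y) && (PySem.Str.isIn x y || PySem.Str.isIn y x)

-- ---- characterization of B's 'pos' map ----
theorem pv_pos_get (z : String) :
    ∀ (l : List String) (n : Nat) (d : PySem.Dict String Nat), l.Nodup →
      ((l.zipIdx n).foldl (fun d p => d.insert p.1 p.2) d).get? z
        = if z ∈ l then some (n + l.idxOf z) else d.get? z := by
  intro l
  induction l with
  | nil => intro n d _; simp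
  | cons x l ih =>
    intro n d hnd
    rw [List.zipIdx_cons, List.foldl_cons,
      ih (n+1) (d.insert x n) (List.nodup_cons.mp hnd).2]
    by_cases hzl : z ∈ l
    · have hzx : z ≠ x := fun h => (List.nodup_cons.mp hnd).1 (h ▸ hzl)
      rw [if_pos hzl, if_pos (by simp [hzl]), List.idxOf_cons_ne _ (by simpa using hzx.symm)]
      congr 1; omega
    · rw [if_neg hzl]
      by_cases hzx : z = x
      · subst hzx
        rw [if_pos (by simp), PySem.Dict.get?_insert_self, List.idxOf_cons_self]
        simp
      · rw [if_neg (by simp [hzl, hzx]), PySem.Dict.get?_insert_of_ne _ _ hzx]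

-- ---- the offer fold keeps, per key, the minimum of all offered values ----
theorem pv_offer_fold (z : String) :
    ∀ (L : List (String × Nat)) (d : PySem.Dict String Nat),
      (L.foldl (fun d p => pvOffer d p.1 p.2) d).get? z
        = ((L.filter (fun p => p.1 == z)).map Prod.snd).foldl
            (fun o j => some (o.elim j (fun w => min w j))) (d.get? z) := by
  intro L
  induction L with
  | nil => intro d; rfl
  | cons p L ih =>
    intro d
    rw [List.foldl_cons, ih]
    by_cases hpz : p.1 = z
    · rw [List.filter_cons_of_pos (by simp [hpz]), List.map_cons, List.foldl_cons]
      congr 1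
      subst hpz
      unfold pvOffer
      cases hg : d.get? p.1 with
      | none =>
        have hc : d.contains p.1 = false := by rw [PySem.Dict.contains_eq_isSome_get?, hg]; rfl
        rw [if_pos (by simp [hc]), PySem.Dict.get?_insert_self]
        rfl
      | some w =>
        have hc : d.contains p.1 = true := by rw [PySem.Dict.contains_eq_isSome_get?, hg]; rfl
        rw [PySem.Dict.getD_of_get?_eq_some d 0 hg, hc]
        by_cases hlt : p.2 < w
        · rw [if_pos (by simp [hlt]), PySem.Dict.get?_insert_self]
          simp [Option.elim, Nat.min_eq_right (Nat.le_of_lt hlt)]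
        · rw [if_neg (by simp [hlt]), hg]
          simp [Option.elim, Nat.min_eq_left (Nat.le_of_not_gt hlt)]
    · rw [List.filter_cons_of_neg (by simp [hpz])]
      congr 1
      unfold pvOffer
      split
      · rw [PySem.Dict.get?_insert_of_ne _ _ (fun h => hpz h.symm)]
      · rfl

-- ---- the option-min fold is List.min? ----
theorem pv_omin_some (vs : List Nat) :
    ∀ (w : Nat), vs.foldl (fun o j => some (o.elim j (fun v => min v j))) (some w)
      = some (vs.foldl min w) := by
  induction vs with
  | nil => intro w; rfl
  | cons v vs ih => intro w; simpa using ih (min w v)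

theorem pv_omin_eq_min? (vs : List Nat) :
    vs.foldl (fun o j => some (o.elim j (fun v => min v j))) none = vs.min? := by
  cases vs with
  | nil => rfl
  | cons v vs => rw [List.foldl_cons]; exact pv_omin_some vs v

-- ---- B's substring-offer lists ----
def pvOffers (pos : PySem.Dict String Nat) (xi : String × Nat) : List (String × Nat) :=
  (PySem.List.pyRange 0 (PySem.Str.len xi.1 + 1) 1).flatMap (fun a =>
    (PySem.List.pyRange a (PySem.Str.len xi.1 + 1) 1).flatMap (fun b =>
      let sub := PySem.Str.slice xi.1 (some a) (some b)
      if !(sub == xi.1) && pos.contains sub then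
        [(xi.1, pos.getD sub 0), (sub, xi.2)]
      else []))

-- B's triple loop is the offer fold over the flattened offer list
theorem pv_best_eq_flat (ids : List String) (pos : PySem.Dict String Nat) :
    ids.zipIdx.foldl (fun best xi =>
      (PySem.List.pyRange 0 (PySem.Str.len xi.1 + 1) 1).foldl (fun best a =>
        (PySem.List.pyRange a (PySem.Str.len xi.1 + 1) 1).foldl (fun best b =>
          let sub := PySem.Str.slice xi.1 (some a) (some b)
          if !(sub == xi.1) && pos.contains sub then
            pvOffer (pvOffer best xi.1 (pos.getD sub 0)) sub xi.2
          else best) best) best)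
      PySem.Dict.empty
    = (ids.zipIdx.flatMap (pvOffers pos)).foldl (fun d p => pvOffer d p.1 p.2) PySem.Dict.empty := by
  rw [List.foldl_flatMap]
  apply PySem.List.foldl_congr_mem
  intro d xi _
  unfold pvOffers
  rw [List.foldl_flatMap]
  apply PySem.List.foldl_congr_mem
  intro d' a _
  rw [List.foldl_flatMap]
  apply PySem.List.foldl_congr_mem
  intro d'' b _
  simp only
  split
  · rfl
  · rfl

-- a Python slice of x is an infix of x
theorem pv_slice_infix (x : String) (a b : Int) (ha : 0 ≤ a) (hb : 0 ≤ b) :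
    (PySem.Str.slice x (some a) (some b)).toList <:+: x.toList := by
  have : (PySem.Str.slice x (some a) (some b)).toList = PySem.List.slice x.toList (some a) (some b) := by
    simp [pysem]
  rw [this, PySem.List.slice_toNat x.toList ha hb]
  exact (List.take_prefix _ _).isInfix.trans (List.drop_suffix _ _).isInfix

-- conversely, every infix of x is some slice of x with bounds 0 ≤ a ≤ b ≤ len x
theorem pv_infix_slice (x y : String) (h : y.toList <:+: x.toList) :
    ∃ (a b : Int), 0 ≤ a ∧ a ≤ b ∧ b ≤ (x.toList.length : Int) ∧
      PySem.Str.slice x (some a) (some b) = y := by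
  obtain ⟨s, t, hst⟩ := h
  have hxlen : x.toList.length = s.length + y.toList.length + t.length := by
    rw [← hst]; simp; omega
  refine ⟨(s.length : Int), (s.length : Int) + (y.toList.length : Int), by positivity, by omega,
    by omega, ?_⟩
  apply String.toList_inj.mp
  have hb : (0:Int) ≤ (s.length : Int) + (y.toList.length : Int) := by positivity
  have h1 : (PySem.Str.slice x (some (s.length : Int)) (some ((s.length : Int) + (y.toList.length : Int)))).toList
      = PySem.List.slice x.toList (some (s.length : Int)) (some ((s.length : Int) + (y.toList.length : Int))) := by
    simp [pysem]
  rw [h1, PySem.List.slice_toNat x.toList (by positivity) hb]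
  have h2 : ((s.length : Int) + (y.toList.length : Int)).toNat = s.length + y.toList.length := by omega
  rw [h2, Int.toNat_natCast, Nat.add_sub_cancel_left, ← hst, List.append_assoc,
    List.drop_left, List.take_left]

-- membership in the flattened offer list, for distinct ids:
-- everything offered under key z is the index of a substring partner of z …
theorem pv_offers_sound (ids : List String) (pos : PySem.Dict String Nat)
    (hpos : ∀ w, pos.get? w = if w ∈ ids then some (ids.idxOf w) else none)
    (z : String) (m : Nat)
    (hm : (z, m) ∈ ids.zipIdx.flatMap (pvOffers pos)) :
    ∃ y, ids[m]? = some y ∧ pvRel z y = true := by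
  rw [List.mem_flatMap] at hm
  obtain ⟨xi, hxi, hoff⟩ := hm
  obtain ⟨x, i⟩ := xi
  have hxi' : ids[i]? = some x := List.mk_mem_zipIdx_iff_getElem?.mp hxi
  unfold pvOffers at hoff
  rw [List.mem_flatMap] at hoff
  obtain ⟨a, ha, hoff⟩ := hoff
  rw [List.mem_flatMap] at hoff
  obtain ⟨b, hb, hoff⟩ := hoff
  have ha' := (PySem.List.mem_pyRange_one).mp ha
  have hb' := (PySem.List.mem_pyRange_one).mp hb
  simp only at hoff
  set sub := PySem.Str.slice x (some a) (some b) with hsub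
  by_cases hcond : (!(sub == x) && pos.contains sub) = true
  · rw [if_pos hcond] at hoff
    rw [Bool.and_eq_true, Bool.not_eq_eq_eq_not, Bool.not_true, beq_eq_false_iff_ne] at hcond
    obtain ⟨hne, hcont⟩ := hcond
    have hsubmem : sub ∈ ids := by
      rw [PySem.Dict.contains_eq_isSome_get?, hpos sub] at hcont
      by_contra hn; rw [if_neg hn] at hcont; simp at hcont
    have hinfix : sub.toList <:+: x.toList := pv_slice_infix x a b ha'.1 (by omega)

    have hIn : PySem.Str.isIn sub x = true := by
      rw [PySem.Str.isIn_iff_infix]; exact hinfix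
    simp only [List.mem_cons, List.not_mem_nil, or_false, Prod.mk.injEq] at hoff
    rcases hoff with ⟨hz, hm'⟩ | ⟨hz, hm'⟩
    · -- offer (x, pos[sub]) : partner sub of z = x
      subst hz
      have hgd : pos.getD sub 0 = ids.idxOf sub := by
        rw [PySem.Dict.getD_eq_get?_getD, hpos sub, if_pos hsubmem]; rfl
      rw [hgd] at hm'
      refine ⟨sub, ?_, ?_⟩
      · rw [hm']
        exact List.getElem?_eq_some_iff.mpr ⟨List.idxOf_lt_length_of_mem hsubmem, List.getElem_idxOf _⟩
      · unfold pvRel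
        simp only [Bool.and_eq_true, Bool.not_eq_eq_eq_not, Bool.not_true, beq_eq_false_iff_ne]
        exact ⟨fun h => hne h.symm, by rw [Bool.or_eq_true]; right; exact hIn⟩
    · -- offer (sub, i) : partner x of z = sub
      subst hm'
      refine ⟨x, hxi', ?_⟩
      rw [hz]
      unfold pvRel
      simp only [Bool.and_eq_true, Bool.not_eq_eq_eq_not, Bool.not_true, beq_eq_false_iff_ne]
      exact ⟨hne, by rw [Bool.or_eq_true]; left; exact hIn⟩
  · rw [if_neg hcond] at hoff
    simp at hoff

-- … and the index of every substring partner of z is offered under key z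
theorem pv_offers_complete (ids : List String) (hnd : ids.Nodup) (pos : PySem.Dict String Nat)
    (hpos : ∀ w, pos.get? w = if w ∈ ids then some (ids.idxOf w) else none)
    (z : String) (hz : z ∈ ids) (m : Nat) (y : String)
    (hy : ids[m]? = some y) (hrel : pvRel z y = true) :
    (z, m) ∈ ids.zipIdx.flatMap (pvOffers pos) := by
  unfold pvRel at hrel
  rw [Bool.and_eq_true, Bool.not_eq_eq_eq_not, Bool.not_true, beq_eq_false_iff_ne, Bool.or_eq_true] at hrel
  obtain ⟨hne, hdir⟩ := hrel
  have hymem : y ∈ ids := List.mem_iff_getElem?.mpr ⟨m, hy⟩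
  have hcontz : pos.contains z = true := by
    rw [PySem.Dict.contains_eq_isSome_get?, hpos z, if_pos hz]; rfl
  have hconty : pos.contains y = true := by
    rw [PySem.Dict.contains_eq_isSome_get?, hpos y, if_pos hymem]; rfl
  rw [List.mem_flatMap]
  rcases hdir with hzy | hyz
  · -- z is a substring of y = ids[m] : offered while processing (y, m)
    refine ⟨(y, m), List.mk_mem_zipIdx_iff_getElem?.mpr hy, ?_⟩
    obtain ⟨a, b, ha, hab, hble, hslice⟩ :=
      pv_infix_slice y z ((PySem.Str.isIn_iff_infix _ _).mp hzy)
    unfold pvOffers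
    rw [List.mem_flatMap]
    refine ⟨a, PySem.List.mem_pyRange_one.mpr
      ⟨ha, by show a < PySem.Str.len y + 1; rw [PySem.Str.len_eq]; omega⟩, ?_⟩
    rw [List.mem_flatMap]
    refine ⟨b, PySem.List.mem_pyRange_one.mpr
      ⟨hab, by show b < PySem.Str.len y + 1; rw [PySem.Str.len_eq]; omega⟩, ?_⟩
    show (z, m) ∈ (if !(PySem.Str.slice y (some a) (some b) == y) &&
        pos.contains (PySem.Str.slice y (some a) (some b)) then
      [(y, pos.getD (PySem.Str.slice y (some a) (some b)) 0),
        (PySem.Str.slice y (some a) (some b), m)] else [])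
    rw [hslice, if_pos (by simp [hcontz, hne])]
    simp
  · -- y = ids[m] is a substring of z : offered while processing z itself
    obtain ⟨iz, hiz⟩ := List.mem_iff_getElem?.mp hz
    refine ⟨(z, iz), List.mk_mem_zipIdx_iff_getElem?.mpr hiz, ?_⟩
    obtain ⟨a, b, ha, hab, hble, hslice⟩ :=
      pv_infix_slice z y ((PySem.Str.isIn_iff_infix _ _).mp hyz)
    unfold pvOffers
    rw [List.mem_flatMap]
    refine ⟨a, PySem.List.mem_pyRange_one.mpr
      ⟨ha, by show a < PySem.Str.len z + 1; rw [PySem.Str.len_eq]; omega⟩, ?_⟩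
    rw [List.mem_flatMap]
    refine ⟨b, PySem.List.mem_pyRange_one.mpr
      ⟨hab, by show b < PySem.Str.len z + 1; rw [PySem.Str.len_eq]; omega⟩, ?_⟩
    show (z, m) ∈ (if !(PySem.Str.slice z (some a) (some b) == z) &&
        pos.contains (PySem.Str.slice z (some a) (some b)) then
      [(z, pos.getD (PySem.Str.slice z (some a) (some b)) 0),
        (PySem.Str.slice z (some a) (some b), iz)] else [])
    rw [hslice, if_pos (by simp [hconty, Ne.symm hne])]
    have hgd : pos.getD y 0 = ids.idxOf y := by
      rw [PySem.Dict.getD_eq_get?_getD, hpos y, if_pos hymem]; rfl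
    have hidx : ids.idxOf y = m := by
      obtain ⟨hml, hmy⟩ := List.getElem?_eq_some_iff.mp hy
      rw [← hmy]; exact List.Nodup.idxOf_getElem hnd m hml
    simp [hgd, hidx]

-- first match of find? = least index satisfying the predicate
theorem pv_find?_of_min (l : List String) (p : String → Bool) (v : Nat) (hv : v < l.length)
    (hp : p l[v] = true) (hmin : ∀ m (hm : m < l.length), m < v → p l[m] = false) :
    l.find? p = some l[v] := by
  rw [List.find?_eq_some_iff_append]
  refine ⟨hp, l.take v, l.drop (v+1), ?_, ?_⟩
  · rw [← List.drop_eq_getElem_cons hv, List.take_append_drop]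
  · intro a ha
    rw [List.mem_take_iff_getElem] at ha
    obtain ⟨j, hj, hja⟩ := ha
    rw [← hja, hmin j (by omega) (by omega)]; rfl

-- the three dict-building stages of port B, named for the final assembly
def pvSums (rows : List (List String)) : PySem.Dict String (List Int) :=
  rows.foldl pvStepB PySem.Dict.empty

def pvPos (ids : List String) : PySem.Dict String Nat :=
  ids.zipIdx.foldl (fun d p => d.insert p.1 p.2) PySem.Dict.empty

def pvBest (ids : List String) : PySem.Dict String Nat :=
  ids.zipIdx.foldl (fun best xi =>
    (PySem.List.pyRange 0 (PySem.Str.len xi.1 + 1) 1).foldl (fun best a =>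
      (PySem.List.pyRange a (PySem.Str.len xi.1 + 1) 1).foldl (fun best b =>
        let sub := PySem.Str.slice xi.1 (some a) (some b)
        if !(sub == xi.1) && (pvPos ids).contains sub then
          pvOffer (pvOffer best xi.1 ((pvPos ids).getD sub 0)) sub xi.2
        else best) best) best)
    PySem.Dict.empty

-- the merge-loop bodies of the two ports, as named step functions (definitionally the ports' lambdas)
def pvMStepA (items : List (String × List Int)) (header : List String)
    (merged : PySem.Dict String (List Int)) (p : String × List Int) : PySem.Dict String (List Int) :=
  match items.find? (fun q => !(p.1 == q.1) && (PySem.Str.isIn p.1 q.1 || PySem.Str.isIn q.1 p.1)) with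
  | some q =>
    let merged_id := if PySem.Str.len q.1 ≤ PySem.Str.len p.1 then p.1 else q.1
    let merged :=
      if !merged.contains merged_id then
        merged.insert merged_id (List.replicate (header.length - 1) 0)
      else merged
    merged.modify merged_id [] (fun l =>
      (List.range p.2.length).foldl (fun l i => l.set i (l.getD i 0 + p.2.getD i 0)) l)
  | none => merged.insert p.1 p.2

def pvMStepB (ids : List String) (best : PySem.Dict String Nat) (width : Nat)
    (m : PySem.Dict String (List Int)) (p : String × List Int) : PySem.Dict String (List Int) :=
  match best.get? p.1 with
  | none => m.insert p.1 p.2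
  | some j =>
    let y := (PySem.List.pyGet? ids (j : Int)).getD ""
    let t := if PySem.Str.len y ≤ PySem.Str.len p.1 then p.1 else y
    let acc := m.getD t (List.replicate width 0)
    m.insert t ((acc.zip p.2).map (fun q => q.1 + q.2))

-- the per-item bridge: A's linear first-match scan agrees with B's best-index map
theorem pv_bridge (items : List (String × List Int)) (ids : List String)
    (hids : ids = items.map Prod.fst) (hnd : ids.Nodup)
    (pos best : PySem.Dict String Nat)
    (hpos : ∀ w, pos.get? w = if w ∈ ids then some (ids.idxOf w) else none)
    (hbest : ∀ w, best.get? w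
      = (((ids.zipIdx.flatMap (pvOffers pos)).filter (fun p => p.1 == w)).map Prod.snd).min?)
    (z : String) (hz : z ∈ ids) :
    Option.map Prod.fst
        (items.find? (fun q => !(z == q.1) && (PySem.Str.isIn z q.1 || PySem.Str.isIn q.1 z)))
      = (best.get? z).map (fun (j : Nat) => (PySem.List.pyGet? ids (j : Int)).getD "") := by
  have hfind : ids.find? (fun y => pvRel z y)
      = Option.map Prod.fst (items.find?
          (fun q => !(z == q.1) && (PySem.Str.isIn z q.1 || PySem.Str.isIn q.1 z))) := by
    rw [hids, List.find?_map]; rfl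
  rw [← hfind, hbest z]
  cases hmin : (((ids.zipIdx.flatMap (pvOffers pos)).filter (fun p => p.1 == z)).map Prod.snd).min? with
  | none =>
    rw [List.min?_eq_none_iff] at hmin
    rw [Option.map_none, List.find?_eq_none]
    intro y hy
    obtain ⟨m, hm⟩ := List.mem_iff_getElem?.mp hy
    intro hrel
    have := pv_offers_complete ids hnd pos hpos z hz m y hm hrel
    have hmem : m ∈ ((ids.zipIdx.flatMap (pvOffers pos)).filter (fun p => p.1 == z)).map Prod.snd := by
      rw [List.mem_map]
      exact ⟨(z, m), List.mem_filter.mpr ⟨this, by simp⟩, rfl⟩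
    rw [hmin] at hmem
    simp at hmem
  | some v =>
    obtain ⟨hvmem, hvmin⟩ := List.min?_eq_some_iff.mp hmin
    rw [List.mem_map] at hvmem
    obtain ⟨pv, hpv, hpv2⟩ := hvmem
    obtain ⟨hpvL, hpvz⟩ := List.mem_filter.mp hpv
    have hpvz' : pv.1 = z := by simpa using hpvz
    have hpveq : pv = (z, v) := by
      obtain ⟨p1, p2⟩ := pv; simp only at hpvz' hpv2; rw [hpvz', hpv2]
    rw [hpveq] at hpvL
    obtain ⟨yv, hyv, hrelv⟩ := pv_offers_sound ids pos hpos z v hpvL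
    obtain ⟨hvlt, hyv'⟩ := List.getElem?_eq_some_iff.mp hyv
    have hfound : ids.find? (fun y => pvRel z y) = some ids[v] := by
      apply pv_find?_of_min ids _ v hvlt (by rw [hyv']; exact hrelv)
      intro m hm hmv
      by_contra hcon
      have hrelm : pvRel z ids[m] = true := by
        cases h : pvRel z ids[m] with
        | true => rfl
        | false => exact absurd h hcon
      have := pv_offers_complete ids hnd pos hpos z hz m ids[m]
        (List.getElem?_eq_some_iff.mpr ⟨hm, rfl⟩) hrelm
      have hmem : m ∈ ((ids.zipIdx.flatMap (pvOffers pos)).filter (fun p => p.1 == z)).map Prod.snd := by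
        rw [List.mem_map]
        exact ⟨(z, m), List.mem_filter.mpr ⟨this, by simp⟩, rfl⟩
      have := hvmin m hmem
      omega
    rw [hfound, Option.map_some]
    congr 1
    rw [hyv', PySem.List.pyGet?_natCast, hyv]
    rfl

theorem pv_loop2 (header : List String) (items : List (String × List Int))
    (ids : List String) (best : PySem.Dict String Nat)
    (hlen : ∀ p ∈ items, p.2.length = header.length - 1)
    (hfb : ∀ z, z ∈ items.map Prod.fst →
      Option.map Prod.fst
          (items.find? (fun q => !(z == q.1) && (PySem.Str.isIn z q.1 || PySem.Str.isIn q.1 z)))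
        = (best.get? z).map (fun (j : Nat) => (PySem.List.pyGet? ids (j : Int)).getD "")) :
    ∀ (rest : List (String × List Int)) (m : PySem.Dict String (List Int)),
      (∀ r ∈ rest, r ∈ items) →
      (∀ p ∈ m.items, p.2.length = header.length - 1) →
      rest.foldl (pvMStepA items header) m = rest.foldl (pvMStepB ids best (header.length - 1)) m := by
  intro rest
  induction rest with
  | nil => intro m _ _; rfl
  | cons p rest ih =>
    intro m hrest hminv
    have hp_item : p ∈ items := hrest p (by simp)
    have hplen : p.2.length = header.length - 1 := hlen p hp_item
    have hstep : pvMStepA items header m p = pvMStepB ids best (header.length - 1) m p := by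
      have hfbp := hfb p.1 (List.mem_map.mpr ⟨p, hp_item, rfl⟩)
      cases hg : best.get? p.1 with
      | none =>
        rw [hg, Option.map_none, Option.map_eq_none_iff] at hfbp
        simp only [pvMStepA, pvMStepB, hfbp, hg]
      | some j =>
        rw [hg, Option.map_some] at hfbp
        cases hf : items.find?
            (fun q => !(p.1 == q.1) && (PySem.Str.isIn p.1 q.1 || PySem.Str.isIn q.1 p.1)) with
        | none => rw [hf, Option.map_none] at hfbp; exact absurd hfbp (by simp)
        | some q =>
          rw [hf, Option.map_some, Option.some_inj] at hfbp
          simp only [pvMStepA, pvMStepB, hf, hg, ← hfbp]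
          set mid := (if PySem.Str.len q.1 ≤ PySem.Str.len p.1 then p.1 else q.1) with hmid
          cases hc : m.contains mid with
          | true =>
            obtain ⟨w, hgw⟩ : ∃ w, m.get? mid = some w := by
              rw [PySem.Dict.contains_eq_isSome_get?] at hc
              exact Option.isSome_iff_exists.mp hc
            have hwlen : w.length = header.length - 1 :=
              hminv _ (PySem.Dict.mem_items_of_get?_eq_some _ hgw)
            simp only [Bool.not_true, Bool.false_eq_true, if_false]
            rw [show (m.modify mid [] (fun l =>
                  (List.range p.2.length).foldl (fun l i => l.set i (l.getD i 0 + p.2.getD i 0)) l))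
                = m.insert mid ((List.range p.2.length).foldl
                    (fun l i => l.set i (l.getD i 0 + p.2.getD i 0)) (m.getD mid []))
              from by simp [PySem.Dict.modify]]
            rw [PySem.Dict.getD_of_get?_eq_some m [] hgw,
              PySem.Dict.getD_of_get?_eq_some m (List.replicate (header.length - 1) 0) hgw,
              pvFold_set_eq_zadd p.2 w (hwlen.trans hplen.symm)]
            rfl
          | false =>
            simp only [Bool.not_false, if_true]
            rw [show ((m.insert mid (List.replicate (header.length - 1) 0)).modify mid [] (fun l =>
                  (List.range p.2.length).foldl (fun l i => l.set i (l.getD i 0 + p.2.getD i 0)) l))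
                = (m.insert mid (List.replicate (header.length - 1) 0)).insert mid
                    ((List.range p.2.length).foldl
                      (fun l i => l.set i (l.getD i 0 + p.2.getD i 0))
                      ((m.insert mid (List.replicate (header.length - 1) 0)).getD mid []))
              from by simp [PySem.Dict.modify]]
            rw [PySem.Dict.insert_insert_self, PySem.Dict.getD_insert_self,
              PySem.Dict.getD_of_not_contains m _ hc,
              pvFold_set_eq_zadd p.2 (List.replicate (header.length - 1) 0) (by simp [hplen])]
            rfl
    have hminv' : ∀ r ∈ (pvMStepB ids best (header.length - 1) m p).items,
        r.2.length = header.length - 1 := by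
      intro r hr
      rw [pvMStepB] at hr
      cases hg : best.get? p.1 with
      | none =>
        simp only [hg] at hr
        rcases (PySem.Dict.mem_items_insert _ _ _ _).mp hr with h1 | h2
        · rw [h1]; exact hplen
        · exact hminv _ h2.1
      | some j =>
        simp only [hg] at hr
        rcases (PySem.Dict.mem_items_insert _ _ _ _).mp hr with h1 | h2
        · rw [h1]
          show ((List.zip _ p.2).map _).length = _
          rw [List.length_map, List.length_zip, hplen]
          set t := (if PySem.Str.len ((PySem.List.pyGet? ids (j : Int)).getD "") ≤ PySem.Str.len p.1
            then p.1 else (PySem.List.pyGet? ids (j : Int)).getD "") with ht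
          cases hacc : m.get? t with
          | none =>
            rw [PySem.Dict.getD_of_get?_eq_none _ _ hacc]
            simp
          | some w =>
            rw [PySem.Dict.getD_of_get?_eq_some _ _ hacc]
            have hw := hminv _ (PySem.Dict.mem_items_of_get?_eq_some _ hacc)
            simp [hw]
        · exact hminv _ h2.1
    rw [List.foldl_cons, List.foldl_cons, hstep]
    exact ih (pvMStepB ids best (header.length - 1) m p) (fun r hr => hrest r (by simp [hr])) hminv'

-- ===== VERDICT (by name: the statement is the Claim_ definition above) =====
theorem merge_sequences_spec : Claim_equal_merge_sequences := by
  unfold Claim_equal_merge_sequences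
  intro data _ hpre
  unfold Spec_merge_sequences
  obtain ⟨hne, hrows⟩ := hpre
  obtain ⟨h, t, rfl⟩ : ∃ h t, data = h :: t := by
    cases data with
    | nil => exact absurd rfl hne
    | cons a b => exact ⟨a, b, rfl⟩
  show ((PySem.List.pyGet? (h :: t) 0).getD [],
      (((PySem.List.slice (h :: t) (some 1) none).foldl pvStepA PySem.Dict.empty).items.foldl
        (pvMStepA ((PySem.List.slice (h :: t) (some 1) none).foldl pvStepA PySem.Dict.empty).items
          ((PySem.List.pyGet? (h :: t) 0).getD [])) PySem.Dict.empty).items)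
    = ((PySem.List.pyGet? (h :: t) 0).getD [],
      ((pvSums (PySem.List.slice (h :: t) (some 1) none)).items.foldl
        (pvMStepB (pvSums (PySem.List.slice (h :: t) (some 1) none)).keys
          (pvBest (pvSums (PySem.List.slice (h :: t) (some 1) none)).keys)
          (((PySem.List.pyGet? (h :: t) 0).getD []).length - 1)) PySem.Dict.empty).items)
  have hH : ((PySem.List.pyGet? (h :: t) 0).getD []) = h := by simp [pysem]
  have hslice : PySem.List.slice (h :: t) (some 1) none = t := by simp [pysem]
  rw [hH, hslice]
  have hrows' : ∀ row ∈ t, row.length = h.length := by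
    intro r hr
    have := (hrows r (by simpa using hr)).1
    simpa using this
  obtain ⟨hL1, hvalsR, hndR⟩ := pv_loop1 h.length t PySem.Dict.empty hrows'
    (by intro p hp; simp [PySem.Dict.empty] at hp) (by simp [PySem.Dict.empty, PySem.Dict.keys])
  have hsums : t.foldl pvStepA PySem.Dict.empty = pvSums t := hL1
  rw [hsums]
  have hvalsR' : ∀ p ∈ (pvSums t).items, p.2.length = h.length - 1 := hvalsR
  have hndR' : (pvSums t).keys.Nodup := hndR
  have hidsitems : (pvSums t).keys = (pvSums t).items.map Prod.fst := rfl
  have hpos : ∀ w, (pvPos (pvSums t).keys).get? w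
      = if w ∈ (pvSums t).keys then some ((pvSums t).keys.idxOf w) else none := by
    intro w
    unfold pvPos
    rw [pv_pos_get w (pvSums t).keys 0 PySem.Dict.empty hndR']
    simp [PySem.Dict.get?_empty]
  have hbflat : pvBest (pvSums t).keys
      = ((pvSums t).keys.zipIdx.flatMap (pvOffers (pvPos (pvSums t).keys))).foldl
          (fun d p => pvOffer d p.1 p.2) PySem.Dict.empty := by
    unfold pvBest
    exact pv_best_eq_flat (pvSums t).keys (pvPos (pvSums t).keys)
  have hbest : ∀ w, (pvBest (pvSums t).keys).get? w
      = ((((pvSums t).keys.zipIdx.flatMap (pvOffers (pvPos (pvSums t).keys))).filter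
          (fun p => p.1 == w)).map Prod.snd).min? := by
    intro w
    rw [hbflat, pv_offer_fold w,
      show (PySem.Dict.empty : PySem.Dict String Nat).get? w = none from rfl, pv_omin_eq_min?]
  have hfb := fun z hz =>
    pv_bridge (pvSums t).items (pvSums t).keys hidsitems hndR'
      (pvPos (pvSums t).keys) (pvBest (pvSums t).keys) hpos hbest z (hidsitems ▸ hz)
  have hmain := pv_loop2 h (pvSums t).items (pvSums t).keys (pvBest (pvSums t).keys)
    hvalsR' (fun z hz => hfb z (hidsitems ▸ hz)) (pvSums t).items PySem.Dict.empty
    (fun r hr => hr) (by intro p hp; simp [PySem.Dict.empty] at hp)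
  rw [hmain]
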